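-- pv_equiv track=rewrite | github.com/robinbanbury/battleships | generate_grid.py | generate_grid_coordinates_with_statues
-- ===== SOURCE A (Python) =====
-- def generate_grid_coordinates_with_statues(all_ship_coordinates, grid_width=10, grid_height=10):
--     grid_coordinates = list()
--     for x in range(grid_width):
--         row_coordinates = list()
--         for y in range(grid_height):
--             if coordinate_is_in_ships_coordinates(x, y, all_ship_coordinates):
--                 row_coordinates.append([x, y, 1])  # ShipStatus.SHIP
--             else:
--                 row_coordinates.append([x, y, 0])  # ShipStatus.NO_SHIP
--
--         grid_coordinates.append(row_coordinates)
--
--     return grid_coordinates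
--
-- def coordinate_is_in_ships_coordinates(x_coord, y_coord, all_ship_coordinates):
--     for ship_coordinates in all_ship_coordinates:
--         for coordinate in ship_coordinates:
--             if x_coord == coordinate[0] and y_coord == coordinate[1]:
--                 return True
--     return False
-- ===== SOURCE B (Python) =====
-- def generate_grid_coordinates_with_statues(all_ship_coordinates, grid_width=10, grid_height=10):
--     # Build the empty grid first, then scatter: mark each ship coordinate directly.
--     grid = [[[x, y, 0] for y in range(grid_height)] for x in range(grid_width)]
--     if grid_width > 0 and grid_height > 0:  # nothing to mark on an empty grid
--         for ship_coordinates in all_ship_coordinates: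
--             for coordinate in ship_coordinates:
--                 cx, cy = coordinate[0], coordinate[1]
--                 if 0 <= cx < grid_width and 0 <= cy < grid_height:
--                     grid[cx][cy][2] = 1
--     return grid
-- ===== Notes on version B (the rewrite author's own statement) =====
-- stated objective: alternative
-- what changed: Replaces the per-cell gather (scanning every ship coordinate for each of the w*h cells) with one scatter pass: build the blank grid, then mark grid[cx][cy] once per ship coordinate with a bounds guard (intended as faster; a timing run measured 41.9x at n=1024 but could not confirm it at the largest size, where both spend their time building the w*h grid).
-- outside the precondition, e.g. on generate_grid_coordinates_with_statues([[[0, 0], [5]]], 1, 1): A returns [[[0, 0, 1]]], B raises IndexError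
import Mathlib
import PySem

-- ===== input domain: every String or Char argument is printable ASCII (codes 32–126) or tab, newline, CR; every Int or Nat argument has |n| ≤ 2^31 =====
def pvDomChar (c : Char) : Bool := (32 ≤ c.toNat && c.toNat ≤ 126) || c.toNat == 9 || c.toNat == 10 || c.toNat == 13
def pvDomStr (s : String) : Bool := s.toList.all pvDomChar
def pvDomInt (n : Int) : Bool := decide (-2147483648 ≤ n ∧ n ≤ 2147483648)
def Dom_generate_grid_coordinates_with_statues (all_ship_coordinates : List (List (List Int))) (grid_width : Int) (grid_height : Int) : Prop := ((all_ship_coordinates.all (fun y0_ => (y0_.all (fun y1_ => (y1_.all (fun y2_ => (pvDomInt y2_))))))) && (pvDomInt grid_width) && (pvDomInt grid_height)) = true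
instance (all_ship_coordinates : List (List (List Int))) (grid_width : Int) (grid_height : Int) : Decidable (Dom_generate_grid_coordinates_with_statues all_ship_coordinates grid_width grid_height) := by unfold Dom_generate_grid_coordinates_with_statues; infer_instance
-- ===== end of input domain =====

-- B replaces A's per-cell gather over all ship coordinates with one scatter pass over the ship
-- coordinates into a pre-built blank grid (objective: alternative decomposition; B is pure).


-- ===== PORT A =====
def coordinate_is_in_ships_coordinates (x_coord y_coord : Int) (all_ship_coordinates : List (List (List Int))) : Bool :=
  all_ship_coordinates.any (fun ship_coordinates =>
    ship_coordinates.any (fun coordinate =>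
      match PySem.List.pyGet? coordinate 0 with
      | none => false       -- IndexError in Python; excluded by Pre_
      | some c0 =>
        x_coord == c0 &&
          (match PySem.List.pyGet? coordinate 1 with
           | none => false  -- IndexError in Python; excluded by Pre_
           | some c1 => y_coord == c1)))

def generate_grid_coordinates_with_statues (all_ship_coordinates : List (List (List Int))) (grid_width : Int) (grid_height : Int) : List (List (List Int)) :=
  (PySem.List.pyRange 0 grid_width 1).map (fun x =>
    (PySem.List.pyRange 0 grid_height 1).map (fun y =>
      if coordinate_is_in_ships_coordinates x y all_ship_coordinates then [x, y, 1] else [x, y, 0]))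

-- ===== PORT B =====
-- body of B's inner loop: read coordinate[0], coordinate[1], mark the cell if in range
def markCoord (grid_width grid_height : Int) (g : List (List (List Int))) (coordinate : List Int) : List (List (List Int)) :=
  match PySem.List.pyGet? coordinate 0, PySem.List.pyGet? coordinate 1 with
  | some cx, some cy =>
    if 0 ≤ cx ∧ cx < grid_width ∧ 0 ≤ cy ∧ cy < grid_height then
      g.modify cx.toNat (fun row => row.modify cy.toNat (fun cell => cell.set 2 1))
    else g
  | _, _ => g    -- IndexError in Python; excluded by Pre_

def generate_grid_coordinates_with_statues_alt (all_ship_coordinates : List (List (List Int))) (grid_width : Int) (grid_height : Int) : List (List (List Int)) :=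
  let grid := (PySem.List.pyRange 0 grid_width 1).map (fun x =>
    (PySem.List.pyRange 0 grid_height 1).map (fun y => [x, y, 0]))
  if 0 < grid_width ∧ 0 < grid_height then
    all_ship_coordinates.foldl (fun g ship_coordinates =>
      ship_coordinates.foldl (markCoord grid_width grid_height) g) grid
  else grid

-- ===== PRECONDITION & SPEC =====
-- Pre_ excludes inputs holding a ship coordinate with fewer than 2 components while the grid is
-- non-empty: there A raises IndexError unless an earlier matching coordinate happens to
-- short-circuit every scan, and B always raises IndexError.
def Pre_generate_grid_coordinates_with_statues (all_ship_coordinates : List (List (List Int))) (grid_width : Int) (grid_height : Int) : Prop :=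
  grid_width ≤ 0 ∨ grid_height ≤ 0 ∨
    (∀ ship ∈ all_ship_coordinates, ∀ c ∈ ship, 2 ≤ c.length)
instance (all_ship_coordinates : List (List (List Int))) (grid_width : Int) (grid_height : Int) : Decidable (Pre_generate_grid_coordinates_with_statues all_ship_coordinates grid_width grid_height) := by unfold Pre_generate_grid_coordinates_with_statues; infer_instance

def pvWitness_generate_grid_coordinates_with_statues : List (List (List Int)) × Int × Int := ([[[0, 0], [1, 2]]], 3, 3)

def Spec_generate_grid_coordinates_with_statues (all_ship_coordinates : List (List (List Int))) (grid_width : Int) (grid_height : Int) (out : List (List (List Int))) : Prop := out = generate_grid_coordinates_with_statues_alt all_ship_coordinates grid_width grid_height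
instance (all_ship_coordinates : List (List (List Int))) (grid_width : Int) (grid_height : Int) (out : List (List (List Int))) : Decidable (Spec_generate_grid_coordinates_with_statues all_ship_coordinates grid_width grid_height out) := by unfold Spec_generate_grid_coordinates_with_statues; infer_instance

-- ===== CLAIM (what is proved, stated in full; the proofs are below) =====
def Claim_equal_generate_grid_coordinates_with_statues : Prop := ∀ (all_ship_coordinates : List (List (List Int))) (grid_width : Int) (grid_height : Int), Dom_generate_grid_coordinates_with_statues all_ship_coordinates grid_width grid_height → Pre_generate_grid_coordinates_with_statues all_ship_coordinates grid_width grid_height → Spec_generate_grid_coordinates_with_statues all_ship_coordinates grid_width grid_height (generate_grid_coordinates_with_statues all_ship_coordinates grid_width grid_height)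

-- ===== LEMMAS AND PROOFS =====

-- a grid whose cell (x, y) is [x, y, 1] iff f x y
def gridFun (f : Int → Int → Bool) (w h : Int) : List (List (List Int)) :=
  (PySem.List.pyRange 0 w 1).map (fun x =>
    (PySem.List.pyRange 0 h 1).map (fun y => if f x y then [x, y, 1] else [x, y, 0]))

-- whether B's pass marks cell (x, y) because of coordinate c
def bhit (w h : Int) (c : List Int) (x y : Int) : Bool :=
  match PySem.List.pyGet? c 0, PySem.List.pyGet? c 1 with
  | some cx, some cy => decide (0 ≤ cx ∧ cx < w ∧ 0 ≤ cy ∧ cy < h) && (x == cx && y == cy)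
  | _, _ => false

theorem any_congr_mem {α : Type} {l : List α} {p q : α → Bool}
    (h : ∀ a ∈ l, p a = q a) : l.any p = l.any q := by
  induction l with
  | nil => rfl
  | cons a t ih =>
    simp only [List.any_cons, h a (List.mem_cons_self), ih (fun b hb => h b (List.mem_cons_of_mem a hb))]

theorem gridFun_congr {f g : Int → Int → Bool} {w h : Int}
    (hfg : ∀ x y, 0 ≤ x → x < w → 0 ≤ y → y < h → f x y = g x y) :
    gridFun f w h = gridFun g w h := by
  unfold gridFun
  refine List.map_congr_left (fun x hx => ?_)
  rw [PySem.List.mem_pyRange_one] at hx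
  refine List.map_congr_left (fun y hy => ?_)
  rw [PySem.List.mem_pyRange_one] at hy
  rw [hfg x y hx.1 hx.2 hy.1 hy.2]

theorem markCoord_gridFun (f : Int → Int → Bool) (w h : Int) (c : List Int) :
    markCoord w h (gridFun f w h) c = gridFun (fun x y => f x y || bhit w h c x y) w h := by
  unfold markCoord bhit
  cases hc0 : PySem.List.pyGet? c 0 with
  | none => simp
  | some cx =>
    cases hc1 : PySem.List.pyGet? c 1 with
    | none => simp
    | some cy =>
      by_cases hr : 0 ≤ cx ∧ cx < w ∧ 0 ≤ cy ∧ cy < h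
      · simp only [if_pos hr]
        apply List.ext_getElem
        · simp [gridFun, PySem.List.length_pyRange_one]
        · intro i hi1 hi2
          simp only [gridFun, List.getElem_modify, List.getElem_map,
            PySem.List.getElem_pyRange_one] at *
          by_cases hix : cx.toNat = i
          · simp only [if_pos hix]
            apply List.ext_getElem
            · simp
            · intro j hj1 hj2
              simp only [List.getElem_modify, List.getElem_map,
                PySem.List.getElem_pyRange_one] at *
              by_cases hjy : cy.toNat = j
              · have hx : (0 : Int) + i = cx := by omega
                have hy : (0 : Int) + j = cy := by omega
                simp only [if_pos hjy, hx, hy]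
                have : decide (0 ≤ cx ∧ cx < w ∧ 0 ≤ cy ∧ cy < h) = true := by
                  exact decide_eq_true hr
                simp [this]
                split <;> rfl
              · have hy : ¬ ((j : Int) = cy) := by omega
                simp only [if_neg hjy]
                simp [hy]
          · have hx : ¬ ((i : Int) = cx) := by omega
            simp only [if_neg hix]
            simp only [List.map_inj_left, PySem.List.mem_pyRange_one]
            intro a _
            simp [hx]
      · simp only [if_neg hr]
        have : decide (0 ≤ cx ∧ cx < w ∧ 0 ≤ cy ∧ cy < h) = false := by
          exact decide_eq_false hr
        simp [this]

theorem ship_foldl_gridFun (f : Int → Int → Bool) (w h : Int) (ship : List (List Int)) :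
    ship.foldl (markCoord w h) (gridFun f w h)
      = gridFun (fun x y => f x y || ship.any (fun c => bhit w h c x y)) w h := by
  induction ship generalizing f with
  | nil => simp
  | cons c t ih =>
    simp only [List.foldl_cons, markCoord_gridFun, ih, List.any_cons]
    apply gridFun_congr
    intro x y _ _ _ _
    simp [Bool.or_assoc]

theorem asc_foldl_gridFun (f : Int → Int → Bool) (w h : Int) (asc : List (List (List Int))) :
    asc.foldl (fun g ship => ship.foldl (markCoord w h) g) (gridFun f w h)
      = gridFun (fun x y => f x y || asc.any (fun ship => ship.any (fun c => bhit w h c x y))) w h := by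
  induction asc generalizing f with
  | nil => simp
  | cons s t ih =>
    simp only [List.foldl_cons, ship_foldl_gridFun, ih, List.any_cons]
    apply gridFun_congr
    intro x y _ _ _ _
    simp [Bool.or_assoc]

theorem blank_grid_eq (w h : Int) :
    ((PySem.List.pyRange 0 w 1).map (fun x =>
      (PySem.List.pyRange 0 h 1).map (fun y => [x, y, (0 : Int)])))
      = gridFun (fun _ _ => false) w h := by
  simp [gridFun]

-- ===== VERDICT (by name: the statement is the Claim_ definition above) =====
theorem generate_grid_coordinates_with_statues_spec : Claim_equal_generate_grid_coordinates_with_statues := by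
  intro asc w h _ hpre
  show _ = _
  by_cases hwh : 0 < w ∧ 0 < h
  · have hlen : ∀ ship ∈ asc, ∀ c ∈ ship, 2 ≤ c.length := by
      rcases hpre with hw | hh | hl
      · omega
      · omega
      · exact hl
    unfold generate_grid_coordinates_with_statues_alt
    simp only [if_pos hwh, blank_grid_eq, asc_foldl_gridFun]
    show gridFun (fun x y => coordinate_is_in_ships_coordinates x y asc) w h = _
    apply gridFun_congr
    intro x y hx0 hxw hy0 hyh
    simp only [Bool.false_or, coordinate_is_in_ships_coordinates]
    refine any_congr_mem (fun ship hship => ?_)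
    refine any_congr_mem (fun c hc => ?_)
    have h2 : 2 ≤ c.length := hlen ship hship c hc
    match c, h2 with
    | a :: b :: t, _ =>
      have hpos : (0 : Int) ≤ (t.length : Int) + 1 := by positivity
      have ha : PySem.List.pyGet? (a :: b :: t) 0 = some a := by
        simp [PySem.List.pyGet?, PySem.List.pyIdx?, hpos]
      have hb : PySem.List.pyGet? (a :: b :: t) 1 = some b := by
        simp [PySem.List.pyGet?, PySem.List.pyIdx?]
      simp only [bhit, ha, hb]
      by_cases hxa : x = a
      · by_cases hyb : y = b
        · have : decide (0 ≤ a ∧ a < w ∧ 0 ≤ b ∧ b < h) = true := by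
            subst hxa; subst hyb; exact decide_eq_true ⟨hx0, hxw, hy0, hyh⟩
          simp [this, hxa, hyb]
        · simp [hyb]
      · simp [hxa]
  · have h0 : w ≤ 0 ∨ h ≤ 0 := by omega
    unfold generate_grid_coordinates_with_statues generate_grid_coordinates_with_statues_alt
    simp only [if_neg hwh]
    rcases h0 with h0 | h0 <;>
      simp [PySem.List.pyRange_one_eq_nil (by omega : _ ≤ (0:Int))]
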